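-- pv_equiv track=rewrite | github.com/rickystream94/TheRoleOfDivisiveTopicsInNetworkStructure | scripts/data_cleanup/find_potential_corporate_accounts.py | get_num_matching_keywords
-- ===== SOURCE A (Python) =====
-- def get_num_matching_keywords(description):
--     if description is None:
--         return 0
--     keywords = ["customer","customers","support","service","help","ask",
--                 "team","care","information","helpteam","questions",
--                 "concerns","inquiries","assistance","assist","answers","queries","official"]
--     desc_words = [word.lower() for word in description.split()]
--     matching_keywords = 0
--     for keyword in keywords:
--         if keyword in desc_words:
--             matching_keywords += 1
--     return matching_keywords
-- ===== SOURCE B (Python) =====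
-- KEYWORDS = {"customer","customers","support","service","help","ask",
--             "team","care","information","helpteam","questions",
--             "concerns","inquiries","assistance","assist","answers","queries","official"}
--
-- def get_num_matching_keywords(description):
--     if description is None:
--         return 0
--     remaining = set(KEYWORDS)
--     count = 0
--     for word in description.split():
--         w = word.lower()
--         if w in remaining:
--             remaining.discard(w)
--             count += 1
--     return count
-- ===== Notes on version B (the rewrite author's own statement) =====
-- stated objective: alternative
-- what changed: Inverts the traversal: a single pass over the description's words that consumes keywords from a shrinking remaining-set and counts first hits, instead of A's loop over each keyword scanning the whole word list.
import Mathlib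
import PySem

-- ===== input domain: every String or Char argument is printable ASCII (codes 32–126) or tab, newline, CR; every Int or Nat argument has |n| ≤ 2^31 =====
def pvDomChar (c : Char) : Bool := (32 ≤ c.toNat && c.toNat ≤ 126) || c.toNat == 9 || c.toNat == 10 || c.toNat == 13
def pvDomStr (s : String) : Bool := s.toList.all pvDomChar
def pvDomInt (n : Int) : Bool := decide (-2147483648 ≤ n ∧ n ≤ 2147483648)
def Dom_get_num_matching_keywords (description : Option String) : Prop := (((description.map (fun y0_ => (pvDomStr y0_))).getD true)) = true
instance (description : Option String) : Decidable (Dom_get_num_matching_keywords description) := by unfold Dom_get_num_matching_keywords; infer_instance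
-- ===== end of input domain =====

-- ===== PORT A =====
-- B inverts the traversal: one pass over the words, consuming keywords from a remaining-set (alternative).
def get_num_matching_keywords (description : Option String) : Int :=
  match description with
  | none => 0
  | some d =>
    let keywords : List String := ["customer","customers","support","service","help","ask","team","care","information","helpteam","questions","concerns","inquiries","assistance","assist","answers","queries","official"]
    let desc_words : List String := (PySem.Str.split₀ d).map PySem.Str.lower
    keywords.foldl (fun n keyword => if keyword ∈ desc_words then n + 1 else n) (0 : Int)

-- ===== PORT B =====
def pvKeywordSet : PySem.Set String := PySem.Set.ofList ["customer","customers","support","service","help","ask","team","care","information","helpteam","questions","concerns","inquiries","assistance","assist","answers","queries","official"]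

def get_num_matching_keywords_alt (description : Option String) : Int :=
  match description with
  | none => 0
  | some d =>
    ((PySem.Str.split₀ d).foldl
      (fun (st : List String × Int) (word : String) =>
        let w := PySem.Str.lower word
        if w ∈ st.1 then (st.1.erase w, st.2 + 1) else st)
      (pvKeywordSet, (0 : Int))).2

-- ===== PRECONDITION & SPEC =====
def Spec_get_num_matching_keywords (description : Option String) (out : Int) : Prop := out = get_num_matching_keywords_alt description
instance (description : Option String) (out : Int) : Decidable (Spec_get_num_matching_keywords description out) := by unfold Spec_get_num_matching_keywords; infer_instance

-- ===== CLAIM (what is proved, stated in full; the proofs are below) =====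
def Claim_equal_get_num_matching_keywords : Prop := ∀ (description : Option String), Dom_get_num_matching_keywords description → Spec_get_num_matching_keywords description (get_num_matching_keywords description)

-- ===== LEMMAS AND PROOFS =====
lemma pv_foldl_count (ws : List String) (l : List String) (n : Int) :
    l.foldl (fun n keyword => if keyword ∈ ws then n + 1 else n) n
      = n + ((l.filter (fun k => decide (k ∈ ws))).length : Int) := by
  induction l generalizing n with
  | nil => simp
  | cons x xs ih =>
    simp only [List.foldl_cons, List.filter_cons]
    by_cases hx : x ∈ ws
    · simp [hx, ih]; ring
    · simp [hx, ih]

lemma pv_fold_words (ws : List String) (R : List String) (n : Int) (hR : R.Nodup) :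
    (ws.foldl
      (fun (st : List String × Int) (word : String) =>
        let w := PySem.Str.lower word
        if w ∈ st.1 then (st.1.erase w, st.2 + 1) else st)
      (R, n)).2
    = n + ((R.filter (fun k => decide (k ∈ ws.map PySem.Str.lower))).length : Int) := by
  induction ws generalizing R n with
  | nil => simp
  | cons word ws ih =>
    simp only [List.foldl_cons, List.map_cons]
    by_cases hw : PySem.Str.lower word ∈ R
    · rw [if_pos hw, ih _ _ (hR.erase _)]
      have hmem : ∀ k ∈ R.erase (PySem.Str.lower word),
          (decide (k ∈ PySem.Str.lower word :: ws.map PySem.Str.lower)) = (decide (k ∈ ws.map PySem.Str.lower)) := by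
        intro k hk
        have hne : k ≠ PySem.Str.lower word := by
          intro h; subst h
          exact (hR.mem_erase_iff.mp hk).1 rfl
        simp [List.mem_cons, hne]
      have key : (R.filter (fun k => decide (k ∈ PySem.Str.lower word :: ws.map PySem.Str.lower))).length
          = ((R.erase (PySem.Str.lower word)).filter (fun k => decide (k ∈ ws.map PySem.Str.lower))).length + 1 := by
        calc (R.filter (fun k => decide (k ∈ PySem.Str.lower word :: ws.map PySem.Str.lower))).length
            = ((PySem.Str.lower word :: R.erase (PySem.Str.lower word)).filter
                (fun k => decide (k ∈ PySem.Str.lower word :: ws.map PySem.Str.lower))).length :=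
              ((List.perm_cons_erase hw).filter _).length_eq
          _ = ((R.erase (PySem.Str.lower word)).filter (fun k => decide (k ∈ ws.map PySem.Str.lower))).length + 1 := by
              rw [List.filter_cons, List.filter_congr hmem]; simp
      show n + 1 + (((R.erase (PySem.Str.lower word)).filter (fun k => decide (k ∈ ws.map PySem.Str.lower))).length : Int)
          = n + ((R.filter (fun k => decide (k ∈ PySem.Str.lower word :: ws.map PySem.Str.lower))).length : Int)
      rw [key]; push_cast; ring
    · rw [if_neg hw, ih _ _ hR]
      have h : R.filter (fun k => decide (k ∈ ws.map PySem.Str.lower))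
          = R.filter (fun k => decide (k ∈ PySem.Str.lower word :: ws.map PySem.Str.lower)) := by
        apply List.filter_congr
        intro k hk
        have hne : k ≠ PySem.Str.lower word := by rintro rfl; exact hw hk
        simp [List.mem_cons, hne]
      rw [h]
      rfl

-- ===== VERDICT (by name: the statement is the Claim_ definition above) =====
theorem get_num_matching_keywords_spec : Claim_equal_get_num_matching_keywords := by
  intro description _
  unfold Spec_get_num_matching_keywords
  cases description with
  | none => rfl
  | some d =>
    simp only [get_num_matching_keywords, get_num_matching_keywords_alt, pvKeywordSet]
    have hkw : PySem.Set.ofList ["customer","customers","support","service","help","ask","team","care","information","helpteam","questions","concerns","inquiries","assistance","assist","answers","queries","official"] = ["customer","customers","support","service","help","ask","team","care","information","helpteam","questions","concerns","inquiries","assistance","assist","answers","queries","official"] := PySem.Set.ofList_eq_self_of_nodup _ (by decide)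
    rw [hkw, pv_foldl_count, pv_fold_words _ _ _ (by decide)]
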